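-- pv_equiv track=rewrite | github.com/pthpv95/dsa | algo.monster/binary-search/newspapers_split.py | newspapers_split
-- ===== SOURCE A (Python) =====
-- from typing import List
--
-- def newspapers_split(newspapers: List[int], coworkers: int) -> int:
--     low, high = max(newspapers), sum(newspapers)
--
--     def feasible(val):
--         total, read_time = 0, 1
--         for num in newspapers:
--             total += num
--             if total > val:
--                 read_time += 1
--                 total = num
--
--         return read_time <= coworkers
--
--     boundary_index = high
--     while low <= high:
--         mid = (low+high)//2
--         if feasible(mid):
--             boundary_index = mid
--             high = mid - 1
--         else:
--             low = mid + 1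
--     return boundary_index
-- ===== SOURCE B (Python) =====
-- def newspapers_split(newspapers, coworkers):
--     n = len(newspapers)
--     groups = min(max(coworkers, 1), n)
--     prefix = [0]
--     run = 0
--     for t in newspapers:
--         run += t
--         prefix.append(run)
--     # best[i-1]: minimal largest-part sum for splitting the first i papers
--     # into at most the current number of parts (starting with one part)
--     best = prefix[1:]
--     for _ in range(1, groups):
--         best = [min(max(best[j - 1], prefix[i] - prefix[j]) for j in range(1, i + 1))
--                 for i in range(1, n + 1)]
--     return best[-1]
-- ===== Notes on version B (the rewrite author's own statement) =====
-- stated objective: alternative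
-- what changed: A binary-searches the answer between max and sum with a greedy feasibility scan; B computes the same minimal largest-group sum directly by bottom-up dynamic programming over prefix sums (best split of each prefix into at most k groups, k clamped to 1..n).
-- outside the precondition, e.g. on newspapers_split([-10, -10, -10], 8): A returns -30, B returns -10; on newspapers_split([6, 2, 8, -9], 5): A returns 7, B returns 6; on newspapers_split([], 3): A raises ValueError, B raises IndexError
import Mathlib
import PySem

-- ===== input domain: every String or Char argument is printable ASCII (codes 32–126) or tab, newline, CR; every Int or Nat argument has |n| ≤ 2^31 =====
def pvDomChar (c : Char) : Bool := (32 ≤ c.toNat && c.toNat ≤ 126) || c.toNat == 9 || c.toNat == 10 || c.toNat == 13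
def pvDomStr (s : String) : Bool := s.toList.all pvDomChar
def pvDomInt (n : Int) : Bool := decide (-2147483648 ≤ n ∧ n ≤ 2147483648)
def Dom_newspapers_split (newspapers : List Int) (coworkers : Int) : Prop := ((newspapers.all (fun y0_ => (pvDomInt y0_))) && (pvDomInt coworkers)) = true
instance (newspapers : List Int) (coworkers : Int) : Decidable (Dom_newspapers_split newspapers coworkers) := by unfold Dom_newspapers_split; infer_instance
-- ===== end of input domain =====

-- B replaces A's binary search on the answer by bottom-up interval DP over prefix
-- sums (objective: alternative algorithm, similar small-input cost, not faster).

-- ===== PORT A =====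
-- A's inner helper 'feasible(val)': greedy segment count, then compare with coworkers
def pvFeasibleA (newspapers : List Int) (coworkers : Int) (val : Int) : Bool :=
  let st := newspapers.foldl (fun (st : Int × Int) num =>
      let total := st.1 + num
      if total > val then (num, st.2 + 1) else (total, st.2)) (0, 1)
  decide (st.2 ≤ coworkers)

-- A's 'while low <= high' binary-search loop, state (low, high, boundary_index)
def pvSearchA (newspapers : List Int) (coworkers low high bi : Int) : Int :=
  if h : low ≤ high then
    let mid := PySem.Int.floordiv (low + high) 2
    if pvFeasibleA newspapers coworkers mid then
      pvSearchA newspapers coworkers low (mid - 1) mid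
    else
      pvSearchA newspapers coworkers (mid + 1) high bi
  else bi
termination_by (high + 1 - low).toNat
decreasing_by
  · have := PySem.Int.floordiv_two_mid_bounds h
    omega
  · have := PySem.Int.floordiv_two_mid_bounds h
    omega

def newspapers_split (newspapers : List Int) (coworkers : Int) : Int :=
  match PySem.List.max? newspapers (fun y => y) with
  | none => 0   -- Python: max([]) raises ValueError here; excluded by Pre_
  | some low0 => pvSearchA newspapers coworkers low0 newspapers.sum newspapers.sum

-- ===== PORT B =====
-- one round of Source B's DP: best[i-1] for i in 1..n, min over split points j
def pvDPStep (n : Int) (pre best : List Int) : List Int :=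
  (PySem.List.pyRange 1 (n + 1) 1).map (fun i =>
    ((PySem.List.pyRange 1 (i + 1) 1).map (fun j =>
        max (PySem.List.pyGetD best (j - 1) 0)
            (PySem.List.pyGetD pre i 0 - PySem.List.pyGetD pre j 0))).min?.getD 0)
    -- .getD 0: the inner range 1..i is nonempty, Python's min never raises here

def newspapers_split_alt (newspapers : List Int) (coworkers : Int) : Int :=
  let n : Int := newspapers.length
  let groups : Int := min (max coworkers 1) n
  let st := newspapers.foldl (fun (st : List Int × Int) t =>
      let run := st.2 + t
      (st.1 ++ [run], run)) ([0], 0)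
  let pre := st.1
  let best0 := PySem.List.slice pre (some 1) none
  let best := (PySem.List.pyRange 1 groups 1).foldl (fun b _ => pvDPStep n pre b) best0
  PySem.List.pyGetD best (-1) 0  -- best[-1]; IndexError on empty input, excluded by Pre_

-- ===== PRECONDITION & SPEC =====
-- Pre_ excludes (a) the empty list, where A raises ValueError, and (b) lists
-- containing a negative entry when coworkers ≥ 2: reading times are naturally
-- nonnegative, and there A's binary search probes a non-monotone feasibility
-- predicate over a range that can lie below the maximum, so its result is an
-- accident of the search trajectory (e.g. the total -30, achievable by no
-- grouping, for ([-10,-10,-10], 8)) that neither value order would specify.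
def Pre_newspapers_split (newspapers : List Int) (coworkers : Int) : Prop :=
  newspapers ≠ [] ∧ (coworkers ≤ 1 ∨ ∀ x ∈ newspapers, 0 ≤ x)
instance (newspapers : List Int) (coworkers : Int) : Decidable (Pre_newspapers_split newspapers coworkers) := by
  unfold Pre_newspapers_split; infer_instance

def pvWitness_newspapers_split : List Int × Int := ([3, 1, 4, 1, 5], 2)

def Spec_newspapers_split (newspapers : List Int) (coworkers : Int) (out : Int) : Prop := out = newspapers_split_alt newspapers coworkers
instance (newspapers : List Int) (coworkers : Int) (out : Int) : Decidable (Spec_newspapers_split newspapers coworkers out) := by unfold Spec_newspapers_split; infer_instance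

-- ===== CLAIM (what is proved, stated in full; the proofs are below) =====
def Claim_equal_newspapers_split : Prop := ∀ (newspapers : List Int) (coworkers : Int), Dom_newspapers_split newspapers coworkers → Pre_newspapers_split newspapers coworkers → Spec_newspapers_split newspapers coworkers (newspapers_split newspapers coworkers)

-- ===== LEMMAS AND PROOFS =====

-- the common specification: pvOpt k ys = the minimal possible largest-part sum
-- over splits of ys into at most k+1 contiguous parts
def pvOpt : Nat → List Int → Int
  | 0, ys => ys.sum
  | (k+1), ys =>
    (((List.range ys.length).map
        (fun j => max (pvOpt k (ys.take (j+1))) ((ys.drop (j+1)).sum))).min?).getD ys.sum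

-- recursion form of A's greedy fold
def pvCount (v total cnt : Int) : List Int → Int
  | [] => cnt
  | x :: r => if total + x > v then pvCount v x (cnt + 1) r else pvCount v (total + x) cnt r

theorem pvFold_snd (v : Int) (xs : List Int) : ∀ t cnt,
    (xs.foldl (fun (st : Int × Int) num =>
      let total := st.1 + num
      if total > v then (num, st.2 + 1) else (total, st.2)) (t, cnt)).2 = pvCount v t cnt xs := by
  induction xs with
  | nil => intro t cnt; rfl
  | cons x r ih =>
    intro t cnt
    simp only [List.foldl_cons, pvCount]
    by_cases h : t + x > v
    · simp [h, ih]
    · simp [h, ih]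

theorem pvFeasibleA_eq_count (xs : List Int) (c v : Int) :
    pvFeasibleA xs c v = decide (pvCount v 0 1 xs ≤ c) := by
  unfold pvFeasibleA
  simp only []
  rw [pvFold_snd v xs 0 1]

theorem pvCount_ge (v : Int) (xs : List Int) : ∀ t cnt, cnt ≤ pvCount v t cnt xs := by
  induction xs with
  | nil => intro t cnt; simp [pvCount]
  | cons x r ih =>
    intro t cnt
    simp only [pvCount]
    split
    · exact le_trans (by omega) (ih x (cnt + 1))
    · exact ih (t + x) cnt

theorem pvCount_shift (v : Int) (xs : List Int) :
    ∀ t cnt, pvCount v t (cnt + 1) xs = pvCount v t cnt xs + 1 := by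
  induction xs with
  | nil => intro t cnt; rfl
  | cons x r ih =>
    intro t cnt
    simp only [pvCount]
    split
    · exact ih x (cnt + 1)
    · exact ih (t + x) cnt

-- greedy passes through a light part without resetting
theorem pvCount_append_no_reset (v : Int) (p bs : List Int) (hx : ∀ x ∈ p, 0 ≤ x) :
    ∀ t cnt, 0 ≤ t → t + p.sum ≤ v → pvCount v t cnt (p ++ bs) = pvCount v (t + p.sum) cnt bs := by
  induction p with
  | nil => intro t cnt _ _; simp
  | cons x r ih =>
    intro t cnt ht hs
    have hx0 : 0 ≤ x := hx x (by simp)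
    have hr : ∀ y ∈ r, 0 ≤ y := fun y hy => hx y (by simp [hy])
    have hrs : 0 ≤ r.sum := List.sum_nonneg hr
    have hnb : ¬ (t + x > v) := by simp [List.sum_cons] at hs; omega
    simp only [List.cons_append, pvCount, if_neg hnb]
    rw [ih hr (t + x) cnt (by omega) (by simp [List.sum_cons] at hs; omega)]
    congr 1
    simp [List.sum_cons]
    ring

-- if the count stays at cnt, every prefix (in particular all of xs) fits
theorem pvCount_le_imp_sum_le (v : Int) (xs : List Int) (hne : xs ≠ []) :
    ∀ t cnt, pvCount v t cnt xs ≤ cnt → t + xs.sum ≤ v := by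
  induction xs with
  | nil => exact absurd rfl hne
  | cons x r ih =>
    intro t cnt h
    by_cases hb : t + x > v
    · exfalso
      simp only [pvCount, if_pos hb] at h
      have := pvCount_ge v r x (cnt + 1)
      omega
    · simp only [pvCount, if_neg hb] at h
      cases hr : r with
      | nil =>
        subst hr
        simp only [pvCount] at h
        simp [List.sum_cons]
        omega
      | cons y ys =>
        subst hr
        have := ih (by simp) (t + x) cnt h
        simp only [List.sum_cons] at this ⊢
        omega

-- state domination: a lower count, or an equal count with a lower total, never hurts
theorem pvCount_dom (v : Int) (xs : List Int) (hx : ∀ x ∈ xs, 0 ≤ x) :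
    ∀ t t' cnt cnt', 0 ≤ t → 0 ≤ t' → (cnt < cnt' ∨ (cnt = cnt' ∧ t ≤ t')) →
      pvCount v t cnt xs ≤ pvCount v t' cnt' xs := by
  induction xs with
  | nil =>
    intro t t' cnt cnt' _ _ h
    simp only [pvCount]
    omega
  | cons x r ih =>
    intro t t' cnt cnt' ht ht' h
    have hx0 : 0 ≤ x := hx x (by simp)
    have hr : ∀ y ∈ r, 0 ≤ y := fun y hy => hx y (by simp [hy])
    simp only [pvCount]
    by_cases hb : t + x > v <;> by_cases hb' : t' + x > v
    · simp only [if_pos hb, if_pos hb']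
      exact ih hr x x (cnt + 1) (cnt' + 1) hx0 hx0 (by omega)
    · -- t broke but t' did not: impossible when t ≤ t'; so here cnt < cnt'
      simp only [if_pos hb, if_neg hb']
      rcases h with h | ⟨rfl, hle⟩
      · exact ih hr x (t' + x) (cnt + 1) cnt' hx0 (by omega) (by omega)
      · omega
    · simp only [if_neg hb, if_pos hb']
      exact ih hr (t + x) x cnt (cnt' + 1) (by omega) hx0 (by omega)
    · simp only [if_neg hb, if_neg hb']
      exact ih hr (t + x) (t' + x) cnt cnt' (by omega) (by omega) (by omega)

-- greedy is minimal: count ≤ the number of parts of any valid split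
theorem pvCount_le_parts (v : Int) (ps : List (List Int)) (hps : ps ≠ [])
    (hsum : ∀ p ∈ ps, p.sum ≤ v) (hx : ∀ x ∈ ps.flatten, 0 ≤ x) :
    pvCount v 0 1 ps.flatten ≤ ps.length := by
  induction ps with
  | nil => exact absurd rfl hps
  | cons p rest ih =>
    have hxp : ∀ x ∈ p, 0 ≤ x := fun x hxm => hx x (by simp [hxm])
    have hxr : ∀ x ∈ rest.flatten, 0 ≤ x := fun x hxm => hx x (by simp [hxm])
    have hps : 0 ≤ p.sum := List.sum_nonneg hxp
    rw [List.flatten_cons, pvCount_append_no_reset v p rest.flatten hxp 0 1 le_rfl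
      (by simpa using hsum p (by simp))]
    cases hrest : rest with
    | nil =>
      simp only [List.flatten_nil, pvCount]
      simp
    | cons q qs =>
      rw [← hrest]
      have h1 : pvCount v (0 + p.sum) 1 rest.flatten ≤ pvCount v 0 2 rest.flatten :=
        pvCount_dom v rest.flatten hxr (0 + p.sum) 0 1 2 (by omega) le_rfl (by omega)
      have h2 : pvCount v 0 2 rest.flatten = pvCount v 0 1 rest.flatten + 1 := by
        have := pvCount_shift v rest.flatten 0 1
        norm_num at this
        exact this
      have h3 : pvCount v 0 1 rest.flatten ≤ rest.length :=
        ih (by simp [hrest]) (fun q hq => hsum q (by simp [hq])) hxr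
      simp only [List.length_cons]
      push_cast
      omega

-- greedy produces a valid split with exactly count parts
theorem pvCount_parts_exists (v : Int) (xs : List Int) (hne : xs ≠ [])
    (hx : ∀ x ∈ xs, 0 ≤ x) (hle : ∀ x ∈ xs, x ≤ v) :
    ∃ ps : List (List Int), ps.flatten = xs ∧ (∀ p ∈ ps, p ≠ [] ∧ p.sum ≤ v) ∧
      (ps.length : Int) = pvCount v 0 1 xs := by
  obtain ⟨y, ys, rfl⟩ := List.exists_cons_of_ne_nil hne
  have h0 : pvCount v 0 1 (y :: ys) = pvCount v y 1 ys := by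
    have hyv : ¬ (y > v) := by
      have := hle y (by simp); omega
    simp only [pvCount, zero_add, if_neg hyv]
  rw [h0]
  have main : ∀ (zs cur : List Int) (cnt : Int), cur ≠ [] → cur.sum ≤ v →
      (∀ x ∈ cur, 0 ≤ x) → (∀ x ∈ zs, 0 ≤ x) → (∀ x ∈ zs, x ≤ v) →
      ∃ ps : List (List Int), ps.flatten = cur ++ zs ∧ (∀ p ∈ ps, p ≠ [] ∧ p.sum ≤ v) ∧
        (ps.length : Int) + (cnt - 1) = pvCount v cur.sum cnt zs := by
    intro zs
    induction zs with
    | nil =>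
      intro cur cnt hcne hcs hcx _ _
      exact ⟨[cur], by simp, by simp [hcne, hcs], by simp [pvCount]⟩
    | cons x r ih =>
      intro cur cnt hcne hcs hcx hzx hzv
      have hx0 : 0 ≤ x := hzx x (by simp)
      have hxv : x ≤ v := hzv x (by simp)
      have hrx : ∀ y ∈ r, 0 ≤ y := fun y hy => hzx y (by simp [hy])
      have hrv : ∀ y ∈ r, y ≤ v := fun y hy => hzv y (by simp [hy])
      by_cases hb : cur.sum + x > v
      · obtain ⟨ps', hfl, hval, hlen⟩ := ih [x] (cnt + 1) (by simp) (by simp [hxv])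
          (by simp [hx0]) hrx hrv
        refine ⟨cur :: ps', by simp [hfl], ?_, ?_⟩
        · intro p hp
          rcases List.mem_cons.mp hp with rfl | hp
          · exact ⟨hcne, hcs⟩
          · exact hval p hp
        · simp only [pvCount, if_pos hb]
          simp only [List.sum_cons, List.sum_nil, add_zero] at hlen
          simp only [List.length_cons]
          push_cast
          omega
      · obtain ⟨ps', hfl, hval, hlen⟩ := ih (cur ++ [x]) cnt (by simp)
          (by simp; omega)
          (fun z hz => by
            rcases List.mem_append.mp hz with h | h
            · exact hcx z h
            · simp at h
              omega)
          hrx hrv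
        refine ⟨ps', by simp [hfl], hval, ?_⟩
        simp only [pvCount, if_neg hb]
        simpa using hlen
  obtain ⟨ps, hfl, hval, hlen⟩ := main ys [y] 1 (by simp)
    (by simpa using hle y (by simp)) (by simpa using hx y (by simp))
    (fun z hz => hx z (by simp [hz])) (fun z hz => hle z (by simp [hz]))
  exact ⟨ps, by simpa using hfl, hval, by simpa using hlen⟩

theorem pvOpt_nil (k : Nat) : pvOpt k [] = 0 := by
  cases k <;> simp [pvOpt]

theorem pvOpt_succ_exists (k : Nat) (ys : List Int) (hne : ys ≠ []) :
    ∃ j < ys.length, pvOpt (k+1) ys = max (pvOpt k (ys.take (j+1))) ((ys.drop (j+1)).sum) := by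
  set f : Nat → Int := fun j => max (pvOpt k (ys.take (j+1))) ((ys.drop (j+1)).sum) with hf
  have hcne : (List.range ys.length).map f ≠ [] := by
    simp [List.length_pos_of_ne_nil hne, List.ne_nil_iff_length_pos]
  cases hm : ((List.range ys.length).map f).min? with
  | none => exact absurd (List.min?_eq_none_iff.mp hm) hcne
  | some m =>
    have hmem := List.min?_mem hm
    obtain ⟨j, hj, rfl⟩ := List.mem_map.mp hmem
    refine ⟨j, List.mem_range.mp hj, ?_⟩
    simp only [pvOpt, ← hf, hm, Option.getD_some]
    exact congrFun hf j

theorem pvOpt_succ_le_cand (k : Nat) (ys : List Int) (j : Nat) (hj : j < ys.length) :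
    pvOpt (k+1) ys ≤ max (pvOpt k (ys.take (j+1))) ((ys.drop (j+1)).sum) := by
  set f : Nat → Int := fun j => max (pvOpt k (ys.take (j+1))) ((ys.drop (j+1)).sum) with hf
  have hne : ys ≠ [] := by intro h; subst h; simp at hj
  have hcne : (List.range ys.length).map f ≠ [] := by
    simp [List.length_pos_of_ne_nil hne, List.ne_nil_iff_length_pos]
  cases hm : ((List.range ys.length).map f).min? with
  | none => exact absurd (List.min?_eq_none_iff.mp hm) hcne
  | some m =>
    have hle := (List.min?_eq_some_iff.mp hm).2
    have : m ≤ f j := hle (f j) (List.mem_map.mpr ⟨j, List.mem_range.mpr hj, rfl⟩)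
    simp only [pvOpt, ← hf, hm, Option.getD_some]
    exact this

theorem pvOpt_nonneg (k : Nat) (ys : List Int) (hx : ∀ x ∈ ys, 0 ≤ x) : 0 ≤ pvOpt k ys := by
  cases k with
  | zero => exact List.sum_nonneg hx
  | succ k =>
    rcases eq_or_ne ys [] with rfl | hne
    · simp [pvOpt_nil]
    · obtain ⟨j, hj, heq⟩ := pvOpt_succ_exists k ys hne
      rw [heq]
      have : 0 ≤ (ys.drop (j+1)).sum :=
        List.sum_nonneg (fun x hxm => hx x (List.mem_of_mem_drop hxm))
      omega

theorem pvOpt_succ_le (k : Nat) (ys : List Int) (hx : ∀ x ∈ ys, 0 ≤ x) :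
    pvOpt (k + 1) ys ≤ pvOpt k ys := by
  rcases eq_or_ne ys [] with rfl | hne
  · simp [pvOpt_nil]
  · have hlen : 0 < ys.length := List.length_pos_of_ne_nil hne
    have h := pvOpt_succ_le_cand k ys (ys.length - 1) (by omega)
    have hj1 : ys.length - 1 + 1 = ys.length := by omega
    rw [hj1, List.take_length, List.drop_length] at h
    have h0 := pvOpt_nonneg k ys hx
    simp at h
    omega

theorem pvOpt_le_sum (k : Nat) (ys : List Int) (hx : ∀ x ∈ ys, 0 ≤ x) :
    pvOpt k ys ≤ ys.sum := by
  induction k with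
  | zero => simp [pvOpt]
  | succ k ih => exact le_trans (pvOpt_succ_le k ys hx) ih

theorem le_pvOpt (k : Nat) (ys : List Int) (hx : ∀ x ∈ ys, 0 ≤ x) :
    ∀ x ∈ ys, x ≤ pvOpt k ys := by
  induction k generalizing ys with
  | zero => exact fun x hxm => List.single_le_sum hx x hxm
  | succ k ih =>
    intro x hxm
    have hne : ys ≠ [] := List.ne_nil_of_mem hxm
    obtain ⟨j, hj, heq⟩ := pvOpt_succ_exists k ys hne
    rw [heq]
    have : x ∈ ys.take (j+1) ++ ys.drop (j+1) := by rw [List.take_append_drop]; exact hxm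
    rcases List.mem_append.mp this with h | h
    · have := ih (ys.take (j+1)) (fun z hz => hx z (List.mem_of_mem_take hz)) x h
      omega
    · have := List.single_le_sum (fun z hz => hx z (List.mem_of_mem_drop hz)) x h
      omega

-- a valid split into ≤ k+1 parts bounds pvOpt k
theorem pvOpt_le_of_parts (v : Int) (ps : List (List Int)) (hps : ps ≠ [])
    (hpart : ∀ p ∈ ps, p ≠ [] ∧ p.sum ≤ v) (hx : ∀ x ∈ ps.flatten, 0 ≤ x) :
    ∀ k, ps.length ≤ k + 1 → pvOpt k ps.flatten ≤ v := by
  induction ps using List.reverseRecOn with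
  | nil => exact absurd rfl hps
  | append_singleton init last ih =>
    intro k hk
    rcases eq_or_ne init [] with rfl | hinit
    · have hlast := hpart last (by simp)
      have : pvOpt k last ≤ last.sum := pvOpt_le_sum k last (by simpa using hx)
      simpa using le_trans this hlast.2
    · have hxi : ∀ x ∈ init.flatten, 0 ≤ x := fun x hxm => hx x (by simp [hxm])
      have hparti : ∀ p ∈ init, p ≠ [] ∧ p.sum ≤ v := fun p hp => hpart p (by simp [hp])
      have hLpos : 0 < init.flatten.length := by
        obtain ⟨p, ps', rfl⟩ := List.exists_cons_of_ne_nil hinit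
        have hp := (hparti p (by simp)).1
        have : 0 < p.length := List.length_pos_of_ne_nil hp
        simp only [List.flatten_cons, List.length_append]
        omega
      have hlast := hpart last (by simp)
      have hlpos : 0 < last.length := List.length_pos_of_ne_nil hlast.1
      obtain ⟨k', rfl⟩ : ∃ k', k = k' + 1 := by
        have : 0 < init.length := List.length_pos_of_ne_nil hinit
        simp only [List.length_append, List.length_cons, List.length_nil] at hk
        exact ⟨k - 1, by omega⟩
      set L := init.flatten.length with hL
      have hflat : (init ++ [last]).flatten = init.flatten ++ last := by simp
      have hj : L - 1 < (init ++ [last]).flatten.length := by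
        rw [hflat, List.length_append]; omega
      have hcand := pvOpt_succ_le_cand k' (init ++ [last]).flatten (L - 1) hj
      have hL1 : L - 1 + 1 = L := by omega
      rw [hL1] at hcand
      have htake : ((init ++ [last]).flatten).take L = init.flatten := by
        rw [hflat, hL, List.take_left]
      have hdrop : ((init ++ [last]).flatten).drop L = last := by
        rw [hflat, hL, List.drop_left]
      rw [htake, hdrop] at hcand
      have h1 : pvOpt k' init.flatten ≤ v := ih hinit hparti hxi k' (by
        simp only [List.length_append, List.length_cons, List.length_nil] at hk; omega)
      have h2 : last.sum ≤ v := hlast.2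
      omega

-- pvOpt k ys ≤ v is witnessed by a split into ≤ k+1 nonempty parts
theorem parts_of_pvOpt_le (k : Nat) (ys : List Int) (v : Int) (hne : ys ≠ [])
    (hx : ∀ x ∈ ys, 0 ≤ x) (hv : pvOpt k ys ≤ v) :
    ∃ ps : List (List Int), ps.flatten = ys ∧ (∀ p ∈ ps, p ≠ [] ∧ p.sum ≤ v) ∧
      ps.length ≤ k + 1 := by
  induction k generalizing ys with
  | zero =>
    exact ⟨[ys], by simp, by simpa [hne] using hv, by simp⟩
  | succ k ih =>
    obtain ⟨j, hj, heq⟩ := pvOpt_succ_exists k ys hne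
    rw [heq] at hv
    have htne : ys.take (j+1) ≠ [] := by
      have : 0 < (ys.take (j+1)).length := by
        rw [List.length_take]; omega
      exact List.ne_nil_iff_length_pos.mpr this
    have htx : ∀ x ∈ ys.take (j+1), 0 ≤ x := fun x hxm => hx x (List.mem_of_mem_take hxm)
    obtain ⟨ps', hfl, hval, hlen⟩ := ih (ys.take (j+1)) htne htx (by omega)
    rcases eq_or_ne (ys.drop (j+1)) [] with hd | hd
    · have hty : ys.take (j+1) = ys := by
        have h' := List.take_append_drop (j+1) ys
        rw [hd, List.append_nil] at h'
        exact h'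
      exact ⟨ps', by rw [hfl, hty], hval, by omega⟩
    · refine ⟨ps' ++ [ys.drop (j+1)], by simp [hfl], ?_, by simp; omega⟩
      intro p hp
      rcases List.mem_append.mp hp with h | h
      · exact hval p h
      · simp at h
        subst h
        exact ⟨hd, by omega⟩

theorem length_le_length_flatten (ps : List (List Int)) (h : ∀ p ∈ ps, p ≠ []) :
    ps.length ≤ ps.flatten.length := by
  induction ps with
  | nil => simp
  | cons p rest ih =>
    have hp : 0 < p.length := List.length_pos_of_ne_nil (h p (by simp))
    have := ih (fun q hq => h q (by simp [hq]))
    simp only [List.length_cons, List.flatten_cons, List.length_append]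
    omega

-- the feasibility predicate, characterised on v ≥ max: c ≥ 1, nonneg entries
theorem feasible_iff_opt (xs : List Int) (c v : Int) (hne : xs ≠ [])
    (hx : ∀ x ∈ xs, 0 ≤ x) (hc : 1 ≤ c) (hv : ∀ x ∈ xs, x ≤ v) :
    (pvFeasibleA xs c v = true ↔ pvOpt (min c.toNat xs.length - 1) xs ≤ v) := by
  have hlen : 0 < xs.length := List.length_pos_of_ne_nil hne
  have hG : min c.toNat xs.length - 1 + 1 = min c.toNat xs.length := by omega
  rw [pvFeasibleA_eq_count, decide_eq_true_iff]
  constructor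
  · intro hcnt
    obtain ⟨ps, hfl, hval, hplen⟩ := pvCount_parts_exists v xs hne hx hv
    have hpsne : ps ≠ [] := by
      intro h; rw [h] at hfl; exact hne (by simpa using hfl.symm)
    have h1 : ps.length ≤ xs.length := by
      have := length_le_length_flatten ps (fun p hp => (hval p hp).1)
      rw [hfl] at this; exact this
    have h2 : ps.length ≤ c.toNat := by omega
    have := pvOpt_le_of_parts v ps hpsne hval (by rw [hfl]; exact hx)
      (min c.toNat xs.length - 1) (by omega)
    rwa [hfl] at this
  · intro hopt
    obtain ⟨ps, hfl, hval, hplen⟩ := parts_of_pvOpt_le _ xs v hne hx hopt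
    rw [hG] at hplen
    have hpsne : ps ≠ [] := by
      intro h; rw [h] at hfl; exact hne (by simpa using hfl.symm)
    have hcnt := pvCount_le_parts v ps hpsne (fun p hp => (hval p hp).2)
      (by rw [hfl]; exact hx)
    rw [hfl] at hcnt
    have : (ps.length : Int) ≤ c := by
      have h2 : ps.length ≤ c.toNat := le_trans hplen (by omega)
      omega
    omega

-- the binary search homes in on m when feasibility is 'm ≤ v' above mx
theorem search_finds (xs : List Int) (c m mx : Int)
    (hp : ∀ v, mx ≤ v → (pvFeasibleA xs c v = true ↔ m ≤ v)) :
    ∀ low high bi, mx ≤ low → low ≤ m → (m ≤ high ∨ bi = m) →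
      pvSearchA xs c low high bi = m := by
  intro low high bi
  induction low, high, bi using pvSearchA.induct xs c with
  | case1 low high bi hlh mid hfeas ih =>
    intro hmx hlm hhb
    have hdmid : mid = PySem.Int.floordiv (low + high) 2 := rfl
    have hmid := PySem.Int.floordiv_two_mid_bounds hlh
    rw [← hdmid] at hmid
    have hm_le : m ≤ mid := (hp mid (by omega)).mp hfeas
    rw [pvSearchA, dif_pos hlh]
    simp only [← hdmid, if_pos hfeas]
    rcases eq_or_lt_of_le hm_le with rfl | hlt
    · exact ih hmx hlm (Or.inr rfl)
    · exact ih hmx hlm (Or.inl (by omega))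
  | case2 low high bi hlh mid hfeas ih =>
    intro hmx hlm hhb
    have hdmid : mid = PySem.Int.floordiv (low + high) 2 := rfl
    have hmid := PySem.Int.floordiv_two_mid_bounds hlh
    rw [← hdmid] at hmid
    have hm_gt : ¬ m ≤ mid := by
      intro hle
      exact hfeas ((hp mid (by omega)).mpr hle)
    rw [pvSearchA, dif_pos hlh]
    simp only [← hdmid, if_neg hfeas]
    refine ih (by omega) (by omega) ?_
    rcases hhb with h | h
    · exact Or.inl h
    · exact Or.inr h
  | case3 low high bi hlh =>
    intro hmx hlm hhb
    rw [pvSearchA, dif_neg hlh]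
    rcases hhb with h | h
    · omega
    · exact h

-- the search returns boundary_index when nothing is ever feasible
theorem search_none (xs : List Int) (c : Int)
    (hp : ∀ v, pvFeasibleA xs c v = false) :
    ∀ low high bi, pvSearchA xs c low high bi = bi := by
  intro low high bi
  induction low, high, bi using pvSearchA.induct xs c with
  | case1 low high bi hlh mid hfeas ih =>
    rw [hp] at hfeas
    simp at hfeas
  | case2 low high bi hlh mid hfeas ih =>
    have hdmid : mid = PySem.Int.floordiv (low + high) 2 := rfl
    rw [pvSearchA, dif_pos hlh]
    simp only [← hdmid, if_neg hfeas]
    exact ih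
  | case3 low high bi hlh =>
    rw [pvSearchA, dif_neg hlh]

-- with coworkers = 1 every feasible probe equals the total, so the result is the total
theorem search_total (xs : List Int) (hne : xs ≠ []) :
    ∀ low high bi, high ≤ xs.sum → bi = xs.sum → pvSearchA xs 1 low high bi = xs.sum := by
  intro low high bi
  induction low, high, bi using pvSearchA.induct xs 1 with
  | case1 low high bi hlh mid hfeas ih =>
    intro hhs hbi
    have hdmid : mid = PySem.Int.floordiv (low + high) 2 := rfl
    have hmid := PySem.Int.floordiv_two_mid_bounds hlh
    rw [← hdmid] at hmid
    have hcnt : pvCount mid 0 1 xs ≤ 1 := by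
      rw [pvFeasibleA_eq_count, decide_eq_true_iff] at hfeas
      exact hfeas
    have hsum_le : xs.sum ≤ mid := by
      have := pvCount_le_imp_sum_le mid xs hne 0 1 hcnt
      omega
    have hmid_eq : mid = xs.sum := by omega
    rw [pvSearchA, dif_pos hlh]
    simp only [← hdmid, if_pos hfeas]
    exact ih (by omega) (by rw [hmid_eq])
  | case2 low high bi hlh mid hfeas ih =>
    intro hhs hbi
    have hdmid : mid = PySem.Int.floordiv (low + high) 2 := rfl
    rw [pvSearchA, dif_pos hlh]
    simp only [← hdmid, if_neg hfeas]
    exact ih hhs hbi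
  | case3 low high bi hlh =>
    intro _ hbi
    rw [pvSearchA, dif_neg hlh]
    exact hbi

-- ===== B-side characterisation =====

theorem pvPrefix_fold (xs : List Int) : ∀ (acc : List Int) (run : Int),
    xs.foldl (fun (st : List Int × Int) t => (st.1 ++ [st.2 + t], st.2 + t)) (acc, run)
      = (acc ++ (List.range xs.length).map (fun j => run + (xs.take (j+1)).sum), run + xs.sum) := by
  induction xs with
  | nil => intro acc run; simp
  | cons t r ih =>
    intro acc run
    rw [List.foldl_cons, ih]
    simp only [Prod.mk.injEq, List.length_cons, List.range_succ_eq_map, List.map_cons,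
      List.map_map, List.sum_cons, Function.comp_def, List.take_succ_cons]
    constructor
    · simp only [List.take_zero, List.sum_nil, add_zero, List.append_assoc,
        List.singleton_append]
      congr 1
      refine congrArg _ (List.map_congr_left (fun j _ => ?_))
      simp only [Nat.succ_eq_add_one]
      ring
    · ring

theorem pvPrefix_eq (xs : List Int) :
    (xs.foldl (fun (st : List Int × Int) t => (st.1 ++ [st.2 + t], st.2 + t)) ([0], 0)).1
      = (List.range (xs.length + 1)).map (fun j => (xs.take j).sum) := by
  rw [pvPrefix_fold xs [0] 0]
  simp [List.range_succ_eq_map, List.map_map]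

theorem minD_irrel (l : List Int) (hl : l ≠ []) (d d' : Int) :
    l.min?.getD d = l.min?.getD d' := by
  cases h : l.min? with
  | none => exact absurd (List.min?_eq_none_iff.mp h) hl
  | some m => rfl

theorem foldl_const_iterate {α β : Type} (l : List α) (f : β → β) (b : β) :
    l.foldl (fun acc _ => f acc) b = f^[l.length] b := by
  induction l generalizing b with
  | nil => rfl
  | cons x r ih => simp [List.foldl_cons, ih, Function.iterate_succ_apply]

theorem pvDPStep_inv (xs : List Int) (k : Nat) :
    pvDPStep (xs.length : Int)
        ((List.range (xs.length + 1)).map (fun j => (xs.take j).sum))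
        ((List.range xs.length).map (fun i => pvOpt k (xs.take (i+1))))
      = (List.range xs.length).map (fun i => pvOpt (k+1) (xs.take (i+1))) := by
  unfold pvDPStep
  have hn1 : ((xs.length : Int) + 1 - 1).toNat = xs.length := by omega
  rw [PySem.List.pyRange_one, hn1, List.map_map]
  refine List.map_congr_left (fun i hi => ?_)
  have hi' : i < xs.length := List.mem_range.mp hi
  simp only [Function.comp_def]
  have h2 : ((1 : Int) + i + 1 - 1).toNat = i + 1 := by omega
  rw [PySem.List.pyRange_one, h2, List.map_map]
  have hcand : ∀ kk ∈ List.range (i+1),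
      ((fun j => max (PySem.List.pyGetD ((List.range xs.length).map (fun i => pvOpt k (xs.take (i+1)))) (j-1) 0)
          (PySem.List.pyGetD ((List.range (xs.length + 1)).map (fun j => (xs.take j).sum)) ((1:Int) + i) 0
            - PySem.List.pyGetD ((List.range (xs.length + 1)).map (fun j => (xs.take j).sum)) j 0)) ∘ (fun kk : Nat => (1:Int) + kk)) kk
        = (fun j => max (pvOpt k ((xs.take (i+1)).take (j+1))) (((xs.take (i+1)).drop (j+1)).sum)) kk := by
    intro kk hkk
    have hkk' : kk < i + 1 := List.mem_range.mp hkk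
    simp only [Function.comp_def]
    have e1 : (1 : Int) + kk - 1 = ((kk : Nat) : Int) := by ring
    have e2 : (1 : Int) + i = (((i + 1 : Nat)) : Int) := by push_cast; ring
    have e3 : (1 : Int) + kk = (((kk + 1 : Nat)) : Int) := by push_cast; ring
    rw [e1, e2, e3, PySem.List.pyGetD_natCast, PySem.List.pyGetD_natCast, PySem.List.pyGetD_natCast,
      PySem.List.getD_map_range _ _ _ _ (by omega), PySem.List.getD_map_range _ _ _ _ (by omega),
      PySem.List.getD_map_range _ _ _ _ (by omega)]
    have htt : (xs.take (i+1)).take (kk+1) = xs.take (kk+1) := by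
      rw [List.take_take]
      congr 1
      omega
    have hsd : ((xs.take (i+1)).drop (kk+1)).sum = (xs.take (i+1)).sum - ((xs.take (i+1)).take (kk+1)).sum := by
      have := List.sum_take_add_sum_drop (xs.take (i+1)) (kk+1)
      omega
    rw [hsd, htt]
  rw [List.map_congr_left hcand]
  -- both sides are the min over the same nonempty candidate list
  have hlen_take : (xs.take (i+1)).length = i + 1 := by
    rw [List.length_take]
    omega
  have hne' : (List.range (i+1)).map
      (fun j => max (pvOpt k ((xs.take (i+1)).take (j+1))) (((xs.take (i+1)).drop (j+1)).sum)) ≠ [] := by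
    simp
  calc ((List.range (i+1)).map
      (fun j => max (pvOpt k ((xs.take (i+1)).take (j+1))) (((xs.take (i+1)).drop (j+1)).sum))).min?.getD 0
      = ((List.range (i+1)).map
      (fun j => max (pvOpt k ((xs.take (i+1)).take (j+1))) (((xs.take (i+1)).drop (j+1)).sum))).min?.getD (xs.take (i+1)).sum := minD_irrel _ hne' _ _
    _ = pvOpt (k+1) (xs.take (i+1)) := by
        simp only [pvOpt, hlen_take]

theorem alt_eq_pvOpt (xs : List Int) (c : Int) (hne : xs ≠ []) :
    newspapers_split_alt xs c = pvOpt ((min (max c 1) (xs.length : Int) - 1).toNat) xs := by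
  have hlen : 0 < xs.length := List.length_pos_of_ne_nil hne
  unfold newspapers_split_alt
  simp only [pvPrefix_eq]
  have hslice : PySem.List.slice ((List.range (xs.length + 1)).map (fun j => (xs.take j).sum)) (some 1) none
      = (List.range xs.length).map (fun i => pvOpt 0 (xs.take (i+1))) := by
    have h1 : ((1:Int)) = ((1:Nat) : Int) := by norm_num
    rw [h1, PySem.List.slice_from_natCast]
    rw [List.range_succ_eq_map, List.map_cons, List.drop_one, List.tail_cons, List.map_map]
    rfl
  rw [hslice, foldl_const_iterate, PySem.List.length_pyRange_one]
  have hiter : ∀ m : Nat,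
      (fun b => pvDPStep (xs.length : Int) ((List.range (xs.length + 1)).map (fun j => (xs.take j).sum)) b)^[m]
        ((List.range xs.length).map (fun i => pvOpt 0 (xs.take (i+1))))
      = (List.range xs.length).map (fun i => pvOpt m (xs.take (i+1))) := by
    intro m
    induction m with
    | zero => rfl
    | succ m ih => rw [Function.iterate_succ_apply', ih, pvDPStep_inv xs m]
  rw [hiter]
  have hbne : (List.range xs.length).map
      (fun i => pvOpt ((min (max c 1) (xs.length:Int) - 1).toNat) (xs.take (i+1))) ≠ [] := by
    simp
    omega
  rw [PySem.List.pyGetD_neg_one _ _ hbne, List.getLast_eq_getElem, List.getElem_map]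
  have hlr : (List.range xs.length).length = xs.length := List.length_range ..
  have hidx : ((List.range xs.length).map
      (fun i => pvOpt ((min (max c 1) (xs.length:Int) - 1).toNat) (xs.take (i+1)))).length - 1
      = xs.length - 1 := by simp
  simp only [List.length_map, hlr, List.getElem_range]
  have h3 : xs.length - 1 + 1 = xs.length := by omega
  rw [h3, List.take_length]

-- ===== A-side characterisation =====

theorem a_eq_sum_of_le_one (xs : List Int) (c : Int) (hne : xs ≠ []) (hc : c ≤ 1) :
    newspapers_split xs c = xs.sum := by
  unfold newspapers_split
  cases hmax : PySem.List.max? xs (fun y => y) with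
  | none => exact absurd ((PySem.List.max?_eq_none_iff xs _).mp hmax) hne
  | some mx =>
    by_cases hc0 : c ≤ 0
    · refine search_none xs c ?_ mx xs.sum xs.sum
      intro v
      rw [pvFeasibleA_eq_count]
      have := pvCount_ge v xs 0 1
      simp only [decide_eq_false_iff_not]
      omega
    · have hc1 : c = 1 := by omega
      subst hc1
      exact search_total xs hne mx xs.sum xs.sum le_rfl rfl

theorem a_eq_pvOpt (xs : List Int) (c : Int) (hne : xs ≠ [])
    (hx : ∀ x ∈ xs, 0 ≤ x) (hc : 1 ≤ c) :
    newspapers_split xs c = pvOpt (min c.toNat xs.length - 1) xs := by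
  unfold newspapers_split
  cases hmax : PySem.List.max? xs (fun y => y) with
  | none => exact absurd ((PySem.List.max?_eq_none_iff xs _).mp hmax) hne
  | some mx =>
    have hmem : mx ∈ xs := PySem.List.max?_mem hmax
    have hmax' : ∀ y ∈ xs, y ≤ mx := PySem.List.max?_isMax hmax
    refine search_finds xs c _ mx ?_ mx xs.sum xs.sum le_rfl ?_ (Or.inl ?_)
    · intro v hv
      exact feasible_iff_opt xs c v hne hx hc (fun x hxm => le_trans (hmax' x hxm) hv)
    · exact le_pvOpt _ xs hx mx hmem
    · exact pvOpt_le_sum _ xs hx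

-- ===== VERDICT (by name: the statement is the Claim_ definition above) =====
theorem newspapers_split_spec : Claim_equal_newspapers_split := by
  intro xs c _hdom hpre
  unfold Spec_newspapers_split
  obtain ⟨hne, hrest⟩ := hpre
  by_cases hc : c ≤ 1
  · have hb := alt_eq_pvOpt xs c hne
    have hg : (min (max c 1) (xs.length : Int) - 1).toNat = 0 := by
      have h0 : 0 < xs.length := List.length_pos_of_ne_nil hne
      have : (1 : Int) ≤ xs.length := by exact_mod_cast h0
      omega
    rw [a_eq_sum_of_le_one xs c hne hc, hb, hg]
    rfl
  · have hx : ∀ x ∈ xs, 0 ≤ x := hrest.resolve_left hc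
    have hc1 : 1 ≤ c := by omega
    have hb := alt_eq_pvOpt xs c hne
    have hg : (min (max c 1) (xs.length : Int) - 1).toNat = min c.toNat xs.length - 1 := by
      have h0 : 0 < xs.length := List.length_pos_of_ne_nil hne
      have hlen : (1 : Int) ≤ xs.length := by exact_mod_cast h0
      have : max c 1 = c := by omega
      rw [this]
      omega
    rw [a_eq_pvOpt xs c hne hx hc1, hb, hg]
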